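-- pv_equiv track=rewrite | github.com/EDA-Asp/Algebras_of_Multioperations | src/Algs/factories/mappings/mappings.py | mapping_num_f
-- ===== SOURCE A (Python) =====
-- def mapping_num_f(num, l, base):
--     if num == 0:
--         return tuple((0 for _ in range(l)))
--     nums = []
--     while num:
--         num, m = divmod(num, base)
--         nums.append(m)
--     rez = list(reversed(nums))
--     while len(rez) < l:
--         rez.insert(0, 0)
--     return tuple(rez)
-- ===== SOURCE B (Python) =====
-- def mapping_num_f(num, l, base):
--     def digs(n):
--         if n == 0:
--             return []
--         q, r = divmod(n, base)
--         return digs(q) + [r]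
--     ds = digs(num)
--     return tuple([0] * (l - len(ds))) + tuple(ds)
-- ===== Notes on version B (the rewrite author's own statement) =====
-- stated objective: simpler
-- what changed: B replaces A's three-phase loop (collect remainders LSB-first, reverse, then pad by repeated insert(0,0)) with a recursion that yields digits most-significant-first directly and pads once by list arithmetic ([0]*(l-len)), eliminating the reversal and the quadratic insert-at-front loop.
import Mathlib
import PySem

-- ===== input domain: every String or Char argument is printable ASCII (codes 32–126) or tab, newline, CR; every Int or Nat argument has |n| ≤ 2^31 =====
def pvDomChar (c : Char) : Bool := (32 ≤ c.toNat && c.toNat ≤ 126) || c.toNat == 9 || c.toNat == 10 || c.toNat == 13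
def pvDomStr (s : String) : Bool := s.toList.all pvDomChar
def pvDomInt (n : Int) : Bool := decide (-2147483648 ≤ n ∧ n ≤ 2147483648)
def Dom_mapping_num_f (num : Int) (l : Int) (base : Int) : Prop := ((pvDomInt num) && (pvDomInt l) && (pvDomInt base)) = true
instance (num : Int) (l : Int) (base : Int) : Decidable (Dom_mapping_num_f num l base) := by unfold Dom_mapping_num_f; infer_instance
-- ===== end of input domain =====

-- B builds the digit list most-significant-first by recursion and pads with list
-- arithmetic, replacing A's collect-reverse-then-insert(0,0) loop; objective: simpler.

-- ===== PORT A =====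
-- the 'while num:' loop: append divmod remainders LSB-first (fuel num.natAbs+2 is
-- enough for every input Pre_ admits; outside Pre_ the Python loop never terminates)
def pvALoop : Nat → Int → Int → List Int → List Int
  | 0, _, _, nums => nums
  | f + 1, num, base, nums =>
      if num = 0 then nums
      else pvALoop f (PySem.Int.floordiv num base) base (nums ++ [PySem.Int.mod num base])

-- the 'while len(rez) < l: rez.insert(0, 0)' padding loop
def pvAPad (l : Int) (rez : List Int) : List Int :=
  if (rez.length : Int) < l then pvAPad l (0 :: rez) else rez
termination_by (l - rez.length).toNat
decreasing_by simp only [List.length_cons]; omega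

def mapping_num_f (num : Int) (l : Int) (base : Int) : List Int :=
  if num = 0 then (PySem.List.pyRange 0 l 1).map (fun _ => (0 : Int))
  else pvAPad l ((pvALoop (num.natAbs + 2) num base []).reverse)

-- ===== PORT B =====
-- digs(n): recursion producing the digits most-significant-first (same fuel bound)
def pvBDigs : Nat → Int → Int → List Int
  | 0, _, _ => []
  | f + 1, n, base =>
      if n = 0 then []
      else pvBDigs f (PySem.Int.floordiv n base) base ++ [PySem.Int.mod n base]

def mapping_num_f_alt (num : Int) (l : Int) (base : Int) : List Int :=
  let ds := pvBDigs (num.natAbs + 2) num base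
  List.replicate (l - ds.length).toNat 0 ++ ds

-- ===== PRECONDITION & SPEC =====
-- Pre_ excludes exactly the inputs where the Python A never returns: with num ≠ 0 and
-- base ∈ {-1, 0, 1} or (base ≥ 2 and num < 0) the divmod chain never reaches 0
-- (ZeroDivisionError for base = 0, an infinite loop otherwise); A returns everywhere else.
def Pre_mapping_num_f (num : Int) (l : Int) (base : Int) : Prop :=
  num = 0 ∨ base ≤ -2 ∨ (2 ≤ base ∧ 0 ≤ num)
instance (num : Int) (l : Int) (base : Int) : Decidable (Pre_mapping_num_f num l base) := by
  unfold Pre_mapping_num_f; infer_instance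

def pvWitness_mapping_num_f : Int × Int × Int := (13, 5, 3)

def Spec_mapping_num_f (num : Int) (l : Int) (base : Int) (out : List Int) : Prop := out = mapping_num_f_alt num l base
instance (num : Int) (l : Int) (base : Int) (out : List Int) : Decidable (Spec_mapping_num_f num l base out) := by unfold Spec_mapping_num_f; infer_instance

-- ===== CLAIM (what is proved, stated in full; the proofs are below) =====
def Claim_equal_mapping_num_f : Prop := ∀ (num : Int) (l : Int) (base : Int), Dom_mapping_num_f num l base → Pre_mapping_num_f num l base → Spec_mapping_num_f num l base (mapping_num_f num l base)

-- ===== LEMMAS AND PROOFS =====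

-- A's loop only ever appends to its accumulator
theorem pvALoop_acc (f : Nat) : ∀ (n base : Int) (acc : List Int),
    pvALoop f n base acc = acc ++ pvALoop f n base [] := by
  induction f with
  | zero => intro n base acc; simp [pvALoop]
  | succ f ih =>
      intro n base acc
      by_cases h : n = 0
      · simp [pvALoop, h]
      · rw [pvALoop, pvALoop, if_neg h, if_neg h,
          ih (PySem.Int.floordiv n base) base (acc ++ [PySem.Int.mod n base]),
          ih (PySem.Int.floordiv n base) base ([] ++ [PySem.Int.mod n base])]
        simp

-- B's recursion is the reverse of A's remainder list
theorem pvBDigs_eq_reverse (f : Nat) : ∀ (n base : Int),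
    pvBDigs f n base = (pvALoop f n base []).reverse := by
  induction f with
  | zero => intro n base; simp [pvBDigs, pvALoop]
  | succ f ih =>
      intro n base
      by_cases h : n = 0
      · simp [pvBDigs, pvALoop, h]
      · rw [pvBDigs, pvALoop, if_neg h, if_neg h,
          pvALoop_acc f (PySem.Int.floordiv n base) base, ih]
        simp

-- A's insert(0,0) padding loop is prepending the right number of zeros
theorem pvAPad_eq_replicate (l : Int) (rez : List Int) :
    pvAPad l rez = List.replicate (l - rez.length).toNat 0 ++ rez := by
  by_cases h : (rez.length : Int) < l
  · rw [pvAPad, if_pos h, pvAPad_eq_replicate l (0 :: rez)]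
    have h1 : (l - ((0 :: rez).length : Int)).toNat + 1 = (l - rez.length).toNat := by
      simp only [List.length_cons]; omega
    rw [← h1, List.replicate_succ' (n := (l - ((0 :: rez).length : Int)).toNat)]
    simp
  · rw [pvAPad, if_neg h]
    have : (l - (rez.length : Int)).toNat = 0 := by omega
    simp [this]
termination_by (l - rez.length).toNat
decreasing_by simp only [List.length_cons]; omega

-- ===== VERDICT (by name: the statement is the Claim_ definition above) =====
theorem mapping_num_f_spec : Claim_equal_mapping_num_f := by
  intro num l base _ _
  unfold Spec_mapping_num_f mapping_num_f mapping_num_f_alt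
  by_cases h : num = 0
  · subst h
    have hd : pvBDigs (Int.natAbs 0 + 2) 0 base = [] := by simp [pvBDigs]
    rw [hd]
    simp [PySem.List.pyRange_one, List.map_map, Function.comp_def,
      List.map_const']
  · rw [if_neg h, pvAPad_eq_replicate, pvBDigs_eq_reverse]
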